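-- pv_equiv track=rewrite | github.com/NgoQuocBao1010/Caculator---Python-project | calculateAlgorithm.py | minimizeInput
-- ===== SOURCE A (Python) =====
-- def minimizeInput(expression):
-- 	expression = expression.strip()
-- 	newInput = ''
--
-- 	for element in expression:
-- 		if element not in ['+', '-'] or len(newInput) == 0:
-- 			newInput += element
--
-- 		else:
-- 			lastElement = newInput[len(newInput) - 1]
-- 			if lastElement not in ['+', '-']:
-- 				newInput += element
--
-- 			else:
-- 				if element == '+':
-- 					continue
--
-- 				else:
-- 					newInput = newInput[0:-1]
-- 					if lastElement == '+':
-- 						newInput += '-'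
-- 					else:
-- 						newInput += '+'
--
-- 	return newInput
-- ===== SOURCE B (Python) =====
-- import re
--
-- def minimizeInput(expression):
--     def repl(m):
--         return '-' if m.group().count('-') % 2 == 1 else '+'
--     return re.sub(r'[+-]+', repl, expression.strip())
-- ===== Notes on version B (the rewrite author's own statement) =====
-- stated objective: idiomatic
-- what changed: Replaced the character-by-character scan with a mutable buffer (inspecting and rewriting the buffer's last character) by a single regex substitution that collapses each maximal run of +/- signs to one sign chosen by the run's minus-count parity.
import Mathlib
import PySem

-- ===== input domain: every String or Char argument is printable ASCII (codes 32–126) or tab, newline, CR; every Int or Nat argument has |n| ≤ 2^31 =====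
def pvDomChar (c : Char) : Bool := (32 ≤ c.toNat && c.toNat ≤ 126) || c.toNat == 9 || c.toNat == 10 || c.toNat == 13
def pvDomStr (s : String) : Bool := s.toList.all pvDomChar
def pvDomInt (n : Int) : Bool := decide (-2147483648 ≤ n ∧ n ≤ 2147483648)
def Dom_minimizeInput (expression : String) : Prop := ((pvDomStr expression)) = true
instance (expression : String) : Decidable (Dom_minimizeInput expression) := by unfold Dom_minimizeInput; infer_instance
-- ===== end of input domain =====

-- B replaces A's char-by-char scan with a mutable buffer by a single pass that
-- collapses each maximal run of '+'/'-' signs to one sign by minus-count parity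
-- (Python B does this with re.sub); objective: idiomatic.

-- ===== PORT A =====
-- A's loop body, on the accumulated output string (kept as List Char)
def pvAStep (newInput : List Char) (element : Char) : List Char :=
  if ¬ (element = '+' ∨ element = '-') ∨ newInput.length = 0 then
    newInput ++ [element]
  else
    -- lastElement = newInput[len(newInput) - 1]
    let lastElement := newInput.getLastD ' '
    if ¬ (lastElement = '+' ∨ lastElement = '-') then
      newInput ++ [element]
    else
      if element = '+' then newInput  -- continue
      else
        -- newInput = newInput[0:-1]; then append the flipped sign
        (newInput.dropLast) ++ [if lastElement = '+' then '-' else '+']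

def minimizeInput (expression : String) : String :=
  String.ofList ((PySem.Str.strip expression).toList.foldl pvAStep [])

-- ===== PORT B =====
def pvIsSign (c : Char) : Bool := c = '+' || c = '-'

-- sign chosen for one maximal run (first char c, remaining run chars): minus-count parity
def pvRunSign (c : Char) (run : List Char) : Char :=
  if (c :: run).count '-' % 2 = 1 then '-' else '+'

-- the regex substitution re.sub(r'[+-]+', repl, ·): collapse each maximal run, pass other chars through
def pvCollapse : List Char → List Char
  | [] => []
  | c :: rest =>
    if pvIsSign c then
      pvRunSign c (rest.takeWhile pvIsSign) :: pvCollapse (rest.dropWhile pvIsSign)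
    else
      c :: pvCollapse rest
termination_by cs => cs.length
decreasing_by
  · exact Nat.lt_succ_of_le (List.length_dropWhile_le _ _)
  · simp

def minimizeInput_alt (expression : String) : String :=
  String.ofList (pvCollapse (PySem.Str.strip expression).toList)

-- ===== PRECONDITION & SPEC =====
def Spec_minimizeInput (expression : String) (out : String) : Prop := out = minimizeInput_alt expression
instance (expression : String) (out : String) : Decidable (Spec_minimizeInput expression out) := by unfold Spec_minimizeInput; infer_instance

-- ===== CLAIM (what is proved, stated in full; the proofs are below) =====
def Claim_equal_minimizeInput : Prop := ∀ (expression : String), Dom_minimizeInput expression → Spec_minimizeInput expression (minimizeInput expression)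

-- ===== LEMMAS AND PROOFS =====

-- A's step appends a non-sign char unconditionally
theorem pvAStep_nonsign (acc : List Char) (c : Char) (hc : pvIsSign c = false) :
    pvAStep acc c = acc ++ [c] := by
  have h : ¬ (c = '+' ∨ c = '-') := by
    simpa [pvIsSign, not_or] using hc
  simp [pvAStep, h]

-- A's step appends when the accumulator is empty or ends in a non-sign char
theorem pvAStep_append (acc : List Char) (c : Char)
    (h : acc = [] ∨ pvIsSign (acc.getLastD ' ') = false) :
    pvAStep acc c = acc ++ [c] := by
  rcases acc.eq_nil_or_concat with rfl | ⟨bs, b, rfl⟩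
  · simp [pvAStep]
  · have hb : ¬ b = '+' ∧ ¬ b = '-' := by
      rcases h with h | h
      · exact absurd h (by simp)
      · simpa [pvIsSign, not_or] using h
    simp [pvAStep, hb.1, hb.2]

-- folding A's step over a run of sign chars from a state ending in sign s keeps the
-- prefix and flips the final sign once per '-' in the run
theorem pvAStep_signRun (run : List Char) (hrun : ∀ x ∈ run, pvIsSign x = true) :
    ∀ (base : List Char) (s : Char), pvIsSign s = true →
    List.foldl pvAStep (base ++ [s]) run = base ++ [pvRunSign s run] := by
  induction run with
  | nil =>
    intro base s hs
    have hs' : s = '+' ∨ s = '-' := by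
      simpa [pvIsSign] using hs
    simp only [List.foldl_nil]
    rcases hs' with rfl | rfl <;> simp [pvRunSign]
  | cons c cs ih =>
    intro base s hs
    have hc' : c = '+' ∨ c = '-' := by
      simpa [pvIsSign] using hrun c (by simp)
    have hs' : s = '+' ∨ s = '-' := by
      simpa [pvIsSign] using hs
    have hcs : ∀ x ∈ cs, pvIsSign x = true := fun x hx => hrun x (by simp [hx])
    have hstep : pvAStep (base ++ [s]) c =
        base ++ [if c = '+' then s else (if s = '+' then '-' else '+')] := by
      rcases hs' with rfl | rfl <;> rcases hc' with rfl | rfl <;> simp [pvAStep]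
    simp only [List.foldl_cons, hstep]
    rw [ih hcs base _ (by rcases hc' with rfl | rfl <;> rcases hs' with rfl | rfl <;> simp [pvIsSign])]
    congr 2
    -- parity bookkeeping: combining first two signs then counting = counting the whole run
    rcases hc' with rfl | rfl <;> rcases hs' with rfl | rfl <;>
      simp only [pvRunSign, List.count_cons, if_pos] <;>
      simp <;> split_ifs <;> first | rfl | (exfalso; omega)

-- main invariant: from a state that is empty or ends in a non-sign char whenever the
-- next char is a sign, A's fold appends exactly B's collapsed output
theorem pvFold_eq_collapse (cs : List Char) :
    ∀ (acc : List Char),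
    (pvIsSign (cs.headD 'x') = true → acc = [] ∨ pvIsSign (acc.getLastD ' ') = false) →
    List.foldl pvAStep acc cs = acc ++ pvCollapse cs := by
  induction cs using pvCollapse.induct with
  | case1 =>
    intro acc _; simp [pvCollapse]
  | case2 c rest hc ih =>
    intro acc hacc
    have hacc' := hacc (by simpa using hc)
    have htake : ∀ x ∈ rest.takeWhile pvIsSign, pvIsSign x = true :=
      fun _ hx => List.mem_takeWhile_imp hx
    have hdropHead : pvIsSign ((rest.dropWhile pvIsSign).headD 'x') = true →
        (acc ++ [pvRunSign c (rest.takeWhile pvIsSign)]) = [] ∨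
        pvIsSign ((acc ++ [pvRunSign c (rest.takeWhile pvIsSign)]).getLastD ' ') = false := by
      intro hhead
      exfalso
      have hd := List.head?_dropWhile_not pvIsSign rest
      rcases h : rest.dropWhile pvIsSign with _ | ⟨d, ds⟩
      · rw [h] at hhead; simp [pvIsSign] at hhead
      · rw [h] at hd hhead
        simp only [List.head?_cons] at hd
        simp only [List.headD_cons] at hhead
        rw [hhead] at hd
        simp at hd
    simp only [List.foldl_cons]
    rw [pvAStep_append acc c hacc']
    conv_lhs => rw [show rest = rest.takeWhile pvIsSign ++ rest.dropWhile pvIsSign from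
      List.takeWhile_append_dropWhile.symm]
    rw [List.foldl_append,
        pvAStep_signRun (rest.takeWhile pvIsSign) htake acc c hc,
        ih _ hdropHead]
    simp [pvCollapse, hc]
  | case3 c rest hc ih =>
    intro acc _
    simp only [List.foldl_cons]
    rw [pvAStep_nonsign acc c (by simpa using hc),
        ih (acc ++ [c]) (by intro _; right; simpa using hc)]
    simp [pvCollapse, hc]

-- ===== VERDICT (by name: the statement is the Claim_ definition above) =====
theorem minimizeInput_spec : Claim_equal_minimizeInput := by
  intro expression _
  unfold Spec_minimizeInput minimizeInput minimizeInput_alt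
  rw [pvFold_eq_collapse _ [] (fun _ => Or.inl rfl)]
  simp
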